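-- pv_equiv track=rewrite | github.com/CookieYang/answer-of-lintcode | findMissing.py | helpFind
-- ===== SOURCE A (Python) =====
-- def helpFind(str,numList,depth,n):
--     l = len(str)
--     if depth > l - 1:
--         return True
--     if depth == l - 1:
--         n1 = int(str[depth])
--         if n1 == 0 or n1 in numList:
--             return False
--         else:
--             numList.append(n1)
--             return True
--     else:
--         n1 = int(str[depth])
--         n2 = int(str[depth+1])
--         if n1 == 0:
--             return False
--         if n1 in numList:
--             if n1*10 + n2 in numList or n1*10 + n2 > n:
--                 return False
--             else:
--                 numList.append(n1*10+n2)
--                 if helpFind(str,numList,depth+2,n):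
--                     return True
--                 else:
--                     numList.pop()
--                     return False
--         else:
--             numList.append(n1)
--             if helpFind(str,numList,depth+1,n):
--                 return True
--             else:
--                 numList.pop()
--                 if n1*10 + n2 in numList or n1*10 + n2 > n:
--                     return False
--                 else:
--                     numList.append(n1 * 10 + n2)
--                     if helpFind(str, numList, depth + 2,n):
--                         return True
--                     else:
--                         numList.pop()
--                         return False
-- ===== SOURCE B (Python) =====
-- def _solve(s, taken, depth, n):
--     # pure backtracking parse: returns the list of numbers chosen from position
--     # depth onward (single digit preferred over two-digit), or None on failure
--     l = len(s)
--     if depth > l - 1: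
--         return []
--     d1 = int(s[depth])
--     if d1 == 0:
--         return None
--     if depth == l - 1:
--         return None if d1 in taken else [d1]
--     two = d1 * 10 + int(s[depth + 1])
--     if d1 not in taken:
--         rest = _solve(s, taken + [d1], depth + 1, n)
--         if rest is not None:
--             return [d1] + rest
--     if two in taken or two > n:
--         return None
--     rest = _solve(s, taken + [two], depth + 2, n)
--     return None if rest is None else [two] + rest
--
-- def helpFind(str, numList, depth, n):
--     res = _solve(str, numList, depth, n)
--     if res is None:
--         return False
--     numList.extend(res)
--     return True
-- ===== Notes on version B (the rewrite author's own statement) =====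
-- stated objective: simpler
-- what changed: Replaces A's stateful backtracking that appends to and pops from numList across three asymmetric branches with a pure recursive solver returning the chosen suffix (or None), with numList extended once at the end on success.
-- outside the precondition, e.g. on helpFind('12', [], -1, 100): A returns True, B returns True; on helpFind('55a', [5, 55], 0, 100): A returns False, B returns False; on helpFind('10a', [], 0, 5): A raises ValueError, B returns False
import Mathlib
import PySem

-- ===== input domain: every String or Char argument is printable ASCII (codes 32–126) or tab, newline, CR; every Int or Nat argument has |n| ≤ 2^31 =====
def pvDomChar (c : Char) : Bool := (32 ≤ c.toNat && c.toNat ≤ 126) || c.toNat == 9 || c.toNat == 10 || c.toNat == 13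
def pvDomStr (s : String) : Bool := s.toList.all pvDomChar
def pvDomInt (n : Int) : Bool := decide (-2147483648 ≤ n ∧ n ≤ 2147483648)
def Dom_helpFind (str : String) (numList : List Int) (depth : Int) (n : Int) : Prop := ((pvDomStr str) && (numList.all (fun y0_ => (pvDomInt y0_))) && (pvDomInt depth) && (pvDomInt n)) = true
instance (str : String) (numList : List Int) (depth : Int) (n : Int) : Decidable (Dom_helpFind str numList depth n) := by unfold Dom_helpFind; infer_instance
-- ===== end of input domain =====

-- B replaces A's mutate-and-pop backtracking recursion by a pure solver that returns the
-- chosen suffix (or None) and extends numList once at the end (objective: simpler).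
-- Python A and B mutate numList identically (successful parse appended, untouched on failure);
-- the equivalence proved here is about the RETURN value.

-- int(s[i]) for an in-range digit character (Pre_ keeps the raising cases out)
def pyDigit (s : List Char) (i : Int) : Int := (((PySem.List.pyGet? s i).getD '0').toNat : Int) - 48

-- ===== PORT A =====
-- literal transliteration of A; threads numList (append/pop) as state, result = (return, numList)
def goA (s : List Char) (numList : List Int) (depth : Int) (n : Int) : Bool × List Int :=
  if depth > (s.length : Int) - 1 then (true, numList)
  else if depth = (s.length : Int) - 1 then
    let n1 := pyDigit s depth
    if n1 = 0 ∨ n1 ∈ numList then (false, numList)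
    else (true, numList ++ [n1])
  else
    let n1 := pyDigit s depth
    let n2 := pyDigit s (depth + 1)
    if n1 = 0 then (false, numList)
    else if n1 ∈ numList then
      if n1 * 10 + n2 ∈ numList ∨ n1 * 10 + n2 > n then (false, numList)
      else
        let r := goA s (numList ++ [n1 * 10 + n2]) (depth + 2) n
        if r.1 then (true, r.2) else (false, r.2.dropLast)
    else
      let r := goA s (numList ++ [n1]) (depth + 1) n
      if r.1 then (true, r.2)
      else
        let nl := r.2.dropLast
        if n1 * 10 + n2 ∈ nl ∨ n1 * 10 + n2 > n then (false, nl)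
        else
          let r2 := goA s (nl ++ [n1 * 10 + n2]) (depth + 2) n
          if r2.1 then (true, r2.2) else (false, r2.2.dropLast)
termination_by ((s.length : Int) - depth).toNat
decreasing_by all_goals omega

def helpFind (str : String) (numList : List Int) (depth : Int) (n : Int) : Bool :=
  (goA str.toList numList depth n).1

-- ===== PORT B =====
-- literal transliteration of Source B's pure solver _solve
def solveB (s : List Char) (taken : List Int) (depth : Int) (n : Int) : Option (List Int) :=
  if depth > (s.length : Int) - 1 then some []
  else
    let d1 := pyDigit s depth
    if d1 = 0 then none
    else if depth = (s.length : Int) - 1 then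
      if d1 ∈ taken then none else some [d1]
    else
      let two := d1 * 10 + pyDigit s (depth + 1)
      let single : Option (List Int) :=
        if d1 ∉ taken then
          match solveB s (taken ++ [d1]) (depth + 1) n with
          | some rest => some (d1 :: rest)
          | none => none
        else none
      match single with
      | some r => some r
      | none =>
        if two ∈ taken ∨ two > n then none
        else
          match solveB s (taken ++ [two]) (depth + 2) n with
          | some rest => some (two :: rest)
          | none => none
termination_by ((s.length : Int) - depth).toNat
decreasing_by all_goals omega

def helpFind_alt (str : String) (numList : List Int) (depth : Int) (n : Int) : Bool :=
  match solveB str.toList numList depth n with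
  | some _ => true
  | none => false

-- ===== PRECONDITION & SPEC =====
-- Pre_ excludes negative depths (A returns via Python's negative-index wraparound, an artefact)
-- and strings with a non-digit character at or after position depth, on which A's int() may raise
-- ValueError depending on the parse path (a closed-form condition cannot track reachability).
def Pre_helpFind (str : String) (numList : List Int) (depth : Int) (n : Int) : Prop :=
  0 ≤ depth ∧ ((str.toList.drop depth.toNat).all Char.isDigit) = true
instance (str : String) (numList : List Int) (depth : Int) (n : Int) : Decidable (Pre_helpFind str numList depth n) := by unfold Pre_helpFind; infer_instance

def pvWitness_helpFind : String × List Int × Int × Int := ("12", ([] : List Int), 0, 100)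

def Spec_helpFind (str : String) (numList : List Int) (depth : Int) (n : Int) (out : Bool) : Prop := out = helpFind_alt str numList depth n
instance (str : String) (numList : List Int) (depth : Int) (n : Int) (out : Bool) : Decidable (Spec_helpFind str numList depth n out) := by unfold Spec_helpFind; infer_instance

-- ===== CLAIM (what is proved, stated in full; the proofs are below) =====
def Claim_equal_helpFind : Prop := ∀ (str : String) (numList : List Int) (depth : Int) (n : Int), Dom_helpFind str numList depth n → Pre_helpFind str numList depth n → Spec_helpFind str numList depth n (helpFind str numList depth n)

-- ===== LEMMAS AND PROOFS =====

-- the core correspondence: A's stateful backtracker returns true iff B's pure solver succeeds,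
-- and on success A's final numList is taken ++ (B's chosen suffix); holds for ALL inputs
lemma goA_eq_solveB (k : Nat) : ∀ (s : List Char) (depth : Int) (nl : List Int) (n : Int),
    ((s.length : Int) - depth).toNat ≤ k →
    goA s nl depth n = (match solveB s nl depth n with
                        | some r => (true, nl ++ r)
                        | none => (false, nl)) := by
  induction k with
  | zero =>
    intro s depth nl n hk
    rw [goA, solveB]
    have h : depth > (s.length : Int) - 1 := by omega
    simp [h]
  | succ k ih =>
    intro s depth nl n hk
    rw [goA, solveB]
    by_cases h1 : depth > (s.length : Int) - 1
    · simp [h1]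
    · simp only [if_neg h1]
      by_cases h2 : depth = (s.length : Int) - 1
      · -- terminal single-character case
        subst h2
        by_cases hz : pyDigit s ((s.length : Int) - 1) = 0
        · simp [hz]
        · by_cases hm : pyDigit s ((s.length : Int) - 1) ∈ nl
          · simp [hz, hm]
          · simp [hz, hm]
      · -- general case
        by_cases hz : pyDigit s depth = 0
        · simp [h2, hz]
        · simp only [if_neg h2, if_neg hz]
          by_cases hm : pyDigit s depth ∈ nl
          · -- A tries only the two-digit number; B's single branch is none
            rw [ih s (depth + 2) (nl ++ [pyDigit s depth * 10 + pyDigit s (depth + 1)]) n (by omega)]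
            by_cases h3 : pyDigit s depth * 10 + pyDigit s (depth + 1) ∈ nl ∨
                pyDigit s depth * 10 + pyDigit s (depth + 1) > n
            · simp [hm, h3, hz]
            · cases hrec : solveB s (nl ++ [pyDigit s depth * 10 + pyDigit s (depth + 1)]) (depth + 2) n with
              | some rest => simp [hm, h3, hrec]
              | none => simp [hm, h3, hrec]
          · -- A tries the single digit first, then the two-digit number
            rw [ih s (depth + 1) (nl ++ [pyDigit s depth]) n (by omega)]
            cases h4 : solveB s (nl ++ [pyDigit s depth]) (depth + 1) n with
            | some rest => simp [hm, h4]
            | none =>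
              have hd : (nl ++ [pyDigit s depth]).dropLast = nl := by simp
              simp only [hd, Bool.false_eq_true, if_false, ite_self]
              rw [ih s (depth + 2) (nl ++ [pyDigit s depth * 10 + pyDigit s (depth + 1)]) n (by omega)]
              by_cases h3 : pyDigit s depth * 10 + pyDigit s (depth + 1) ∈ nl ∨
                  pyDigit s depth * 10 + pyDigit s (depth + 1) > n
              · simp [hm, h3]
              · cases hrec : solveB s (nl ++ [pyDigit s depth * 10 + pyDigit s (depth + 1)]) (depth + 2) n with
                | some rest => simp [hm, h3, hrec]
                | none => simp [hm, h3, hrec]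

-- ===== VERDICT (by name: the statement is the Claim_ definition above) =====
theorem helpFind_spec : Claim_equal_helpFind := by
  intro str numList depth n _ _
  unfold Spec_helpFind helpFind helpFind_alt
  rw [goA_eq_solveB ((str.toList.length : Int) - depth).toNat str.toList depth numList n le_rfl]
  cases h : solveB str.toList numList depth n <;> simp [h]
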